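-- pv_equiv track=rewrite | github.com/the-bookshelf/cs-architecture | Cloud/ServerlessDesignPatternsandBestPractices_Code/Chapter03/serverless/cupping/persistence/cupping.py | _validate_list_or_tuple
-- ===== SOURCE A (Python) =====
-- def _validate_list_or_tuple(key, value):
--     if not value:
--         return None
--     if not isinstance(value, (list, tuple)):
--         raise ValueError('%s must be a list of strings' % (key, ))
--
--     for _string in value:
--         try:
--             assert isinstance(_string, str)
--         except AssertionError:
--             raise ValueError('%s must be a list of strings' % (key, ))
--
--     return [str(v).strip() for v in value]
-- ===== SOURCE B (Python) =====
-- def _validate_list_or_tuple(key, value):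
--     if not value:
--         return None
--     if not isinstance(value, (list, tuple)):
--         raise ValueError('%s must be a list of strings' % (key, ))
--
--     stack = list(value)
--     out = []
--     while stack:
--         v = stack.pop()
--         if not isinstance(v, str):
--             raise ValueError('%s must be a list of strings' % (key, ))
--         out.append(v.strip())
--     out.reverse()
--     return out
-- ===== Notes on version B (the rewrite author's own statement) =====
-- stated objective: alternative
-- what changed: Replaces A's forward assert-validation loop plus stripping comprehension with a back-to-front construction: the elements are popped off an explicit stack, checked and stripped into an accumulator, which is reversed once at the end.
import Mathlib
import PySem

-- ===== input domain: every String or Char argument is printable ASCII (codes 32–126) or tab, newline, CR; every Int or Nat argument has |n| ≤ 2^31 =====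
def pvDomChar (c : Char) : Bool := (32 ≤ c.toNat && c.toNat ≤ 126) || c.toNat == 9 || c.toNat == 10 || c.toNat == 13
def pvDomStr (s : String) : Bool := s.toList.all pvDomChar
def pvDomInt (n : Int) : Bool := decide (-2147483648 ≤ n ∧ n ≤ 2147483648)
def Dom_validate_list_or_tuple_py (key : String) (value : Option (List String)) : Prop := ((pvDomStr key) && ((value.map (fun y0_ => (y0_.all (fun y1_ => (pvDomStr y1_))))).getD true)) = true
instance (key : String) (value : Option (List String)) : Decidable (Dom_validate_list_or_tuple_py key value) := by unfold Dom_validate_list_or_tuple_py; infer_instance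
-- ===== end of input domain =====

-- B replaces A's forward validation loop + stripping comprehension with a back-to-front pass popping an explicit stack into an accumulator that is reversed at the end (same return values; A's ValueError branches are outside the typed domain).


-- ===== PORT A =====
-- Port of A: falsy check (None or empty), then an iterative validation pass over the
-- elements (the isinstance(_string, str) assert is vacuously true under the type
-- convention), then a stripping comprehension. The ValueError branches are unreachable under the type.
def pyA_check_strings (value : List String) : Bool :=
  match value with
  | [] => true
  | _ :: rest => pyA_check_strings rest   -- assert isinstance(_string, str): always true for String

def validate_list_or_tuple_py (key : String) (value : Option (List String)) : Option (List String) :=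
  match value with
  | none => none
  | some xs =>
    if xs.isEmpty then none
    else if pyA_check_strings xs then some (xs.map (fun v => PySem.Str.strip v))
    else none  -- unreachable: ValueError branch

-- ===== PORT B =====
-- Port of B: while stack: v = stack.pop(); out.append(v.strip()); finally out.reverse().
-- stack.pop() takes the LAST element; modelled with getLast?/dropLast.
def pyB_while (stack : List String) (out : List String) : List String :=
  match h : stack.getLast? with
  | none => out
  | some v => pyB_while stack.dropLast (out ++ [PySem.Str.strip v])
termination_by stack.length
decreasing_by
  cases stack with
  | nil => simp at h
  | cons a rest => simp [List.length_dropLast]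

def validate_list_or_tuple_py_alt (key : String) (value : Option (List String)) : Option (List String) :=
  match value with
  | none => none
  | some xs =>
    if xs.isEmpty then none
    else some ((pyB_while xs []).reverse)

-- ===== PRECONDITION & SPEC =====
def Spec_validate_list_or_tuple_py (key : String) (value : Option (List String)) (out : Option (List String)) : Prop := out = validate_list_or_tuple_py_alt key value
instance (key : String) (value : Option (List String)) (out : Option (List String)) : Decidable (Spec_validate_list_or_tuple_py key value out) := by unfold Spec_validate_list_or_tuple_py; infer_instance

-- ===== CLAIM (what is proved, stated in full; the proofs are below) =====
def Claim_equal_validate_list_or_tuple_py : Prop := ∀ (key : String) (value : Option (List String)), Dom_validate_list_or_tuple_py key value → Spec_validate_list_or_tuple_py key value (validate_list_or_tuple_py key value)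

-- ===== LEMMAS AND PROOFS =====
theorem pyA_check_strings_true (xs : List String) : pyA_check_strings xs = true := by
  induction xs with
  | nil => rfl
  | cons x rest ih => simpa [pyA_check_strings] using ih

theorem pyB_while_eq (stack out : List String) :
    pyB_while stack out = out ++ (stack.reverse.map (fun v => PySem.Str.strip v)) := by
  induction stack using List.reverseRecOn generalizing out with
  | nil => simp [pyB_while]
  | append_singleton as a ih =>
      rw [pyB_while]
      split
      · simp_all
      · next v h =>
          rw [List.getLast?_concat] at h
          cases h
          simp [ih]

-- ===== VERDICT (by name: the statement is the Claim_ definition above) =====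
theorem validate_list_or_tuple_py_spec : Claim_equal_validate_list_or_tuple_py := by
  intro key value _
  unfold Spec_validate_list_or_tuple_py validate_list_or_tuple_py validate_list_or_tuple_py_alt
  cases value with
  | none => rfl
  | some xs => simp [pyA_check_strings_true, pyB_while_eq]
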